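-- pv_equiv track=rewrite | github.com/dlask913/Algorithm | 프로그래머스/unrated/135808. 과일 장수/과일 장수.py | solution
-- ===== SOURCE A (Python) =====
-- from collections import Counter
--
-- def solution(k, m, score):
--     ans = 0
--     score = sorted(Counter(score).items(), key=lambda x: -x[0])
--
--     cnt = 0
--     for i,j in score:
--         cnt += j
--         if cnt>=m:
--             ans += (i*m*(cnt//m))
--             cnt %= m
--
--     return ans
-- ===== SOURCE B (Python) =====
-- def solution(k, m, score):
--     ans = 0
--     for idx, x in enumerate(sorted(score, reverse=True)):
--         if idx % m == m - 1:
--             ans += x * m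
--     return ans
-- ===== Notes on version B (the rewrite author's own statement) =====
-- stated objective: idiomatic
-- what changed: B drops the Counter/distinct-value bookkeeping with a running count carry and floor-division: it fully sorts the scores descending and sums x*m for every element whose index is the last of a completed box (idx % m == m-1).
-- outside the precondition, e.g. on solution(1, -2, [3, 1]): A returns 6, B returns 0
import Mathlib
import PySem

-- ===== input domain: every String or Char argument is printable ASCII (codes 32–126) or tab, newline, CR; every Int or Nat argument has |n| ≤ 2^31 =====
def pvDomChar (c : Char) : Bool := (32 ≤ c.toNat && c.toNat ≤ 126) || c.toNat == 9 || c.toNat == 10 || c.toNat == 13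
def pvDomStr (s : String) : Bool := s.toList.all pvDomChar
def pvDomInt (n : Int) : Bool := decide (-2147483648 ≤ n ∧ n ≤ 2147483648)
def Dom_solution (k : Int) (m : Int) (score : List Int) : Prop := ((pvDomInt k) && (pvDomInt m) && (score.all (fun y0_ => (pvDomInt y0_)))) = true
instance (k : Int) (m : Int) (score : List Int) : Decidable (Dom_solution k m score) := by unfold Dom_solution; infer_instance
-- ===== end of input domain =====

-- B replaces A's Counter + distinct-value carry loop by a full descending sort with a per-index "last of a box" test (more idiomatic, same cost).


-- ===== PORT A =====
-- literal port of A: Counter(score).items() sorted by -key, then the carry loop over (value, count) pairs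
def solution (k : Int) (m : Int) (score : List Int) : Int :=
  let items := PySem.List.sorted (PySem.Dict.counter score).items (fun x => -x.1) false
  (items.foldl (fun (st : Int × Int) p =>
      let cnt := st.2 + p.2
      if cnt ≥ m then (st.1 + p.1 * m * PySem.Int.floordiv cnt m, PySem.Int.mod cnt m)
      else (st.1, cnt)) (0, 0)).1

-- ===== PORT B =====
-- literal port of B: enumerate the fully sorted (descending) scores, add x*m at each index with idx % m == m-1
def solution_alt (k : Int) (m : Int) (score : List Int) : Int :=
  (PySem.List.enumerate (PySem.List.sorted score (fun x => x) true) 0).foldl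
    (fun ans p => if PySem.Int.mod p.1 m = m - 1 then ans + p.2 * m else ans) 0

-- ===== PRECONDITION & SPEC =====
-- Pre_ restricts to the task's natural domain of box sizes, m ≥ 1: at m = 0 A raises
-- ZeroDivisionError on any nonempty score (and B raises too), and a negative box size is
-- outside the problem's domain (the cited excluded input shows A still returning a value there).
def Pre_solution (k : Int) (m : Int) (score : List Int) : Prop := 1 ≤ m
instance (k : Int) (m : Int) (score : List Int) : Decidable (Pre_solution k m score) := by unfold Pre_solution; infer_instance

def pvWitness_solution : Int × Int × List Int := (4, 3, [1, 2, 3, 1, 2, 3, 1])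

def Spec_solution (k : Int) (m : Int) (score : List Int) (out : Int) : Prop := out = solution_alt k m score
instance (k : Int) (m : Int) (score : List Int) (out : Int) : Decidable (Spec_solution k m score out) := by unfold Spec_solution; infer_instance

-- ===== CLAIM (what is proved, stated in full; the proofs are below) =====
def Claim_equal_solution : Prop := ∀ (k : Int) (m : Int) (score : List Int), Dom_solution k m score → Pre_solution k m score → Spec_solution k m score (solution k m score)

-- ===== LEMMAS AND PROOFS =====

-- the multiset of a run list (value, count) flattened back to elements
def flattenRuns : List (Int × Int) → List Int
  | [] => []
  | p :: t => List.replicate p.2.toNat p.1 ++ flattenRuns t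

-- reference sum: walk a list with a running index c, adding x*m whenever c % m = m-1
def gsum (m : Int) : List Int → Int → Int
  | [], _ => 0
  | x :: t, c => (if PySem.Int.mod c m = m - 1 then x * m else 0) + gsum m t (c + 1)

-- uniqueness of Python floor-division/mod for positive divisor
theorem fd_mod_unique {m a t s : Int} (hm : 0 < m) (h : a = t * m + s) (h0 : 0 ≤ s) (h1 : s < m) :
    PySem.Int.floordiv a m = t ∧ PySem.Int.mod a m = s := by
  have hfd : PySem.Int.floordiv a m = t := by
    rw [PySem.Int.floordiv_eq_iff_of_pos hm]
    constructor <;> nlinarith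
  refine ⟨hfd, ?_⟩
  have := PySem.Int.floordiv_mul_add_mod a m
  rw [hfd] at this
  linarith

theorem fd_succ (m c : Int) (hm : 0 < m) :
    PySem.Int.floordiv (c + 1) m =
      PySem.Int.floordiv c m + (if PySem.Int.mod c m = m - 1 then 1 else 0) := by
  have h := PySem.Int.floordiv_mul_add_mod c m
  have h0 := PySem.Int.mod_nonneg c hm
  have h1 := PySem.Int.mod_lt c hm
  by_cases hr : PySem.Int.mod c m = m - 1
  · rw [if_pos hr]
    exact (fd_mod_unique hm (t := PySem.Int.floordiv c m + 1) (s := 0)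
      (by nlinarith) le_rfl hm).1
  · rw [if_neg hr, add_zero]
    exact (fd_mod_unique hm (t := PySem.Int.floordiv c m) (s := PySem.Int.mod c m + 1)
      (by linarith) (by linarith) (by omega)).1

-- shift: floordiv/mod of C + j in terms of the carry r = C % m
theorem fd_mod_shift (m C j : Int) (hm : 0 < m) :
    PySem.Int.floordiv (C + j) m
      = PySem.Int.floordiv C m + PySem.Int.floordiv (PySem.Int.mod C m + j) m ∧
    PySem.Int.mod (C + j) m = PySem.Int.mod (PySem.Int.mod C m + j) m := by
  have h := PySem.Int.floordiv_mul_add_mod C m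
  have h2 := PySem.Int.floordiv_mul_add_mod (PySem.Int.mod C m + j) m
  have h20 := PySem.Int.mod_nonneg (PySem.Int.mod C m + j) hm
  have h21 := PySem.Int.mod_lt (PySem.Int.mod C m + j) hm
  exact fd_mod_unique hm (by nlinarith) h20 h21

-- the block lemma: a constant run of j copies of i contributes i*m*(⌊(c+j)/m⌋-⌊c/m⌋)
theorem gsum_replicate (m : Int) (hm : 0 < m) (j : Nat) (i : Int) (rest : List Int) (c : Int) :
    gsum m (List.replicate j i ++ rest) c
      = i * m * (PySem.Int.floordiv (c + j) m - PySem.Int.floordiv c m) + gsum m rest (c + j) := by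
  induction j generalizing c with
  | zero => simp
  | succ n ih =>
    simp only [List.replicate_succ, List.cons_append]
    rw [show gsum m (i :: (List.replicate n i ++ rest)) c = (if PySem.Int.mod c m = m - 1 then i * m else 0) + gsum m (List.replicate n i ++ rest) (c + 1) from rfl]
    rw [ih (c + 1)]
    rw [fd_succ m c hm]
    have : (c + 1 + (n : Int)) = c + ((n : Int) + 1) := by ring
    rw [this]
    push_cast
    split_ifs <;> ring

theorem flattenRuns_mem {L : List (Int × Int)} {x : Int} (hx : x ∈ flattenRuns L) :
    ∃ p ∈ L, x = p.1 := by
  induction L with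
  | nil => simp [flattenRuns] at hx
  | cons p t ih =>
    simp only [flattenRuns, List.mem_append] at hx
    rcases hx with h | h
    · exact ⟨p, List.mem_cons_self .., (List.eq_of_mem_replicate h)⟩
    · rcases ih h with ⟨q, hq, hxq⟩
      exact ⟨q, List.mem_cons_of_mem _ hq, hxq⟩

-- A's carry loop computes gsum of the flattened run list
theorem foldA_eq (m : Int) (hm : 0 < m) :
    ∀ (L : List (Int × Int)), (∀ p ∈ L, 1 ≤ p.2) → ∀ (C ans : Int), 0 ≤ C →
    L.foldl (fun (st : Int × Int) p =>
        let cnt := st.2 + p.2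
        if cnt ≥ m then (st.1 + p.1 * m * PySem.Int.floordiv cnt m, PySem.Int.mod cnt m)
        else (st.1, cnt)) (ans, PySem.Int.mod C m)
      = (ans + gsum m (flattenRuns L) C,
         PySem.Int.mod (C + (L.map (·.2)).sum) m) := by
  intro L
  induction L with
  | nil => intro _ C ans hC; simp [flattenRuns, gsum]
  | cons p t ih =>
    intro hpos C ans hC
    have hj : 1 ≤ p.2 := hpos p (List.mem_cons_self ..)
    have hjn : p.2 = ((p.2.toNat : Nat) : Int) := by omega
    have hr0 := PySem.Int.mod_nonneg C hm
    have hr1 := PySem.Int.mod_lt C hm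
    have hshift := fd_mod_shift m C p.2 hm
    simp only [List.foldl_cons]
    have hrw : (if PySem.Int.mod C m + p.2 ≥ m
        then (ans + p.1 * m * PySem.Int.floordiv (PySem.Int.mod C m + p.2) m,
              PySem.Int.mod (PySem.Int.mod C m + p.2) m)
        else (ans, PySem.Int.mod C m + p.2))
        = (ans + p.1 * m * (PySem.Int.floordiv (C + p.2) m - PySem.Int.floordiv C m),
           PySem.Int.mod (C + p.2) m) := by
      by_cases hge : PySem.Int.mod C m + p.2 ≥ m
      · rw [if_pos hge, hshift.2]
        have : PySem.Int.floordiv (PySem.Int.mod C m + p.2) m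
            = PySem.Int.floordiv (C + p.2) m - PySem.Int.floordiv C m := by
          rw [hshift.1]; ring
        rw [this]
      · rw [if_neg hge]
        have hfd0 : PySem.Int.floordiv (PySem.Int.mod C m + p.2) m = 0 ∧
            PySem.Int.mod (PySem.Int.mod C m + p.2) m = PySem.Int.mod C m + p.2 :=
          fd_mod_unique hm (by ring) (by linarith) (by linarith)
        rw [hshift.2, hfd0.2]
        have : PySem.Int.floordiv (C + p.2) m - PySem.Int.floordiv C m = 0 := by
          rw [hshift.1, hfd0.1]; ring
        rw [this]; ring_nf
    rw [hrw]
    rw [ih (fun q hq => hpos q (List.mem_cons_of_mem _ hq)) (C + p.2)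
        (ans + p.1 * m * (PySem.Int.floordiv (C + p.2) m - PySem.Int.floordiv C m))
        (by linarith)]
    simp only [flattenRuns, List.map_cons, List.sum_cons]
    rw [gsum_replicate m hm p.2.toNat p.1 (flattenRuns t) C]
    have hcast : ((p.2.toNat : Nat) : Int) = p.2 := by omega
    rw [hcast]
    simp only [Prod.mk.injEq]
    refine ⟨by ring, ?_⟩
    have : C + p.2 + (t.map (·.2)).sum = C + (p.2 + (t.map (·.2)).sum) := by ring
    rw [this]

-- B's enumerate loop computes gsum
theorem foldB_eq (m : Int) (s : List Int) :
    ∀ (c acc : Int), (PySem.List.enumerate s c).foldl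
      (fun ans p => if PySem.Int.mod p.1 m = m - 1 then ans + p.2 * m else ans) acc
      = acc + gsum m s c := by
  induction s with
  | nil => intro c acc; simp [PySem.List.enumerate_nil, gsum]
  | cons x t ih =>
    intro c acc
    rw [PySem.List.enumerate_cons]
    simp only [List.foldl_cons]
    rw [ih (c + 1)]
    simp only [gsum]
    split_ifs <;> ring

theorem count_flattenRuns (score : List Int) (v : Int) :
    ∀ (K : List Int), K.Nodup →
    (flattenRuns (K.map (fun x => (x, (score.count x : Int))))).count v
      = if v ∈ K then score.count v else 0 := by
  intro K
  induction K with
  | nil => intro _; simp [flattenRuns]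
  | cons x t ih =>
    intro hnd
    rcases List.nodup_cons.mp hnd with ⟨hx, hnd'⟩
    simp only [List.map_cons, flattenRuns, List.count_append, List.count_replicate, ih hnd']
    by_cases hv : v = x
    · subst hv
      simp [hx]
    · simp [hv, Ne.symm hv, List.mem_cons]

theorem pairwise_ge_flattenRuns (score : List Int) :
    ∀ (K : List Int), K.Pairwise (· > ·) →
    (flattenRuns (K.map (fun x => (x, (score.count x : Int))))).Pairwise (· ≥ ·) := by
  intro K
  induction K with
  | nil => intro _; simp [flattenRuns]
  | cons x t ih =>
    intro hpw
    rcases List.pairwise_cons.mp hpw with ⟨hgt, hpw'⟩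
    simp only [List.map_cons, flattenRuns]
    apply List.pairwise_append.mpr
    refine ⟨List.pairwise_replicate.mpr (by simp), ih hpw', ?_⟩
    intro a ha b hb
    have hax : a = x := List.eq_of_mem_replicate ha
    rcases flattenRuns_mem hb with ⟨q, hq, hbq⟩
    rcases List.mem_map.mp hq with ⟨y, hy, hyq⟩
    have : b = y := by rw [hbq, ← hyq]
    subst hax; rw [this]
    exact le_of_lt (hgt y hy)

-- main: the sorted run list of A flattens to B's sorted-descending score list
theorem flatten_sorted (score : List Int) :
    flattenRuns (PySem.List.sorted (PySem.Dict.counter score).items (fun x => -x.1) false)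
      = PySem.List.sorted score (fun x => x) true := by
  have hitems : (PySem.Dict.counter score).items
      = (PySem.Set.ofList score).map (fun v => (v, (score.count v : Int))) :=
    PySem.Dict.items_counter score
  have hE_lt : (PySem.List.sorted (PySem.Set.ofList score) (fun x => x) false).Pairwise (· < ·) :=
    PySem.List.sorted_ofList_pairwise_lt score
  have hE_perm : (PySem.List.sorted (PySem.Set.ofList score) (fun x => x) false).Perm
      (PySem.Set.ofList score) := PySem.List.sorted_perm _ _ _
  set E := PySem.List.sorted (PySem.Set.ofList score) (fun x => x) false with hEdef
  set K := E.reverse with hKdef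
  have hK_gt : K.Pairwise (· > ·) := by
    rw [hKdef, List.pairwise_reverse]
    exact hE_lt
  have hK_perm : K.Perm (PySem.Set.ofList score) := (List.reverse_perm E).trans hE_perm
  have hK_nodup : K.Nodup := by
    rw [hKdef, List.nodup_reverse]
    exact hE_lt.imp ne_of_lt
  -- the sorted items list is K mapped to (value, count)
  have hL : PySem.List.sorted (PySem.Dict.counter score).items (fun x => -x.1) false
      = K.map (fun v => (v, (score.count v : Int))) := by
    apply PySem.List.sorted_eq_of_perm_of_pairwise_lt
    · rw [hitems]
      exact hK_perm.map _
    · rw [List.pairwise_map]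
      exact hK_gt.imp (fun h => by simpa using h)
  rw [hL]
  -- both sides are ≥-sorted permutations of score, hence equal
  have hmem : ∀ v : Int, v ∈ K ↔ v ∈ score := by
    intro v
    rw [hK_perm.mem_iff]
    exact PySem.Set.mem_ofList score v
  have hflat_perm : (flattenRuns (K.map (fun v => (v, (score.count v : Int))))).Perm score := by
    rw [List.perm_iff_count]
    intro v
    rw [count_flattenRuns score v K hK_nodup]
    by_cases hv : v ∈ score
    · rw [if_pos ((hmem v).mpr hv)]
    · rw [if_neg (fun h => hv ((hmem v).mp h)), List.count_eq_zero_of_not_mem hv]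
  have hsorted_perm : (PySem.List.sorted score (fun x => x) true).Perm score :=
    PySem.List.sorted_perm _ _ _
  exact List.Perm.eq_of_pairwise (le := (· ≥ ·))
    (fun a b _ _ h1 h2 => le_antisymm h2 h1)
    (pairwise_ge_flattenRuns score K hK_gt)
    (PySem.List.sorted_pairwise_rev score (fun x => x))
    (hflat_perm.trans hsorted_perm.symm)

-- ===== VERDICT (by name: the statement is the Claim_ definition above) =====
theorem solution_spec : Claim_equal_solution := by
  intro k m score hdom hpre
  have hm : 0 < m := hpre
  unfold Spec_solution solution solution_alt
  dsimp only
  rw [foldB_eq m (PySem.List.sorted score (fun x => x) true) 0 0, zero_add]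
  have hmod0 : PySem.Int.mod 0 m = 0 :=
    (fd_mod_unique hm (t := 0) (s := 0) (by ring) le_rfl hm).2
  have hpos : ∀ p ∈ PySem.List.sorted (PySem.Dict.counter score).items (fun x => -x.1) false,
      1 ≤ p.2 := by
    intro p hp
    rw [PySem.List.mem_sorted] at hp
    rw [PySem.Dict.items_counter] at hp
    rcases List.mem_map.mp hp with ⟨v, hv, hvp⟩
    have hvs : v ∈ score := (PySem.Set.mem_ofList score v).mp hv
    have hc : 0 < score.count v := List.count_pos_iff.mpr hvs
    rw [← hvp]
    show (1 : Int) ≤ (score.count v : Int)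
    exact_mod_cast hc
  have := foldA_eq m hm
    (PySem.List.sorted (PySem.Dict.counter score).items (fun x => -x.1) false) hpos 0 0 le_rfl
  rw [hmod0] at this
  dsimp only at this
  rw [this]
  rw [flatten_sorted score]
  simp
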